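-- pv_equiv track=rewrite | github.com/vrthra-forks/GLRParser-notebook | final_parser/Valiant.py | multiply_bool_matrices
-- ===== SOURCE A (Python) =====
-- def multiply_bool_matrices(A, B):
--     m = len(A)
--     C = [[False for _ in range(m)] for _ in range(m)]
--
--     for i in range(m):
--         for j in range(m):
--             for k in range(m):
--                 if A[i][k] and B[k][j]:
--                     C[i][j] = True
--                     break
--     return C
-- ===== SOURCE B (Python) =====
-- def multiply_bool_matrices(A, B):
--     m = len(A)
--     # row k of B packed into one integer bitmask (bit j = B[k][j])
--     bm = []
--     for k in range(m):
--         row = B[k]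
--         mask = 0
--         for j in range(m):
--             if row[j]:
--                 mask |= 1 << j
--         bm.append(mask)
--     out = []
--     for i in range(m):
--         rowA = A[i]
--         acc = 0
--         for k in range(m):
--             if rowA[k]:
--                 acc |= bm[k]
--         # unpack acc via C-level binary formatting: bit j of acc -> entry j
--         s = format(acc, '0%db' % m)[::-1]
--         out.append([c == '1' for c in s[:m]])
--     return out
-- ===== Notes on version B (the rewrite author's own statement) =====
-- stated objective: faster
-- what changed: Replaces the triple boolean loop by bitset rows: each row of B is packed once into an integer bitmask, each output row is the bitwise OR of the masks selected by A's row, and the row is unpacked via C-level binary string formatting, so the inner j-loop disappears into word-parallel integer OR.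
-- outside the precondition, e.g. on multiply_bool_matrices([[False]], []): A returns [[False]], B raises IndexError
import Mathlib
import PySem

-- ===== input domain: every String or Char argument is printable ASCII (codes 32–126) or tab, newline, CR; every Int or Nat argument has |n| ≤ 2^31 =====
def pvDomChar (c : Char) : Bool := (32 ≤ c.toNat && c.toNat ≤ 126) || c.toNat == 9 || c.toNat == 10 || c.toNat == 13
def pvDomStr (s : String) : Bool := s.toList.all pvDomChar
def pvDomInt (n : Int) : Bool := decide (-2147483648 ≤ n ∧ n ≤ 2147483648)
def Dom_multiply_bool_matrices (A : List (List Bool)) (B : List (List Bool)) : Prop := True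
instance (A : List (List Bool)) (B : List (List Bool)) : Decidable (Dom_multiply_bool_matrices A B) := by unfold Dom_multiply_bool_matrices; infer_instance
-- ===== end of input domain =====

-- B packs each row of B into an integer bitmask and ORs selected masks per output row (faster).

-- ===== PORT A =====
-- C[i][j] = True  (Python writes into the preallocated matrix C)
def pvSetC (C : List (List Bool)) (i j : Nat) : List (List Bool) :=
  C.set i ((C.getD i []).set j true)

-- the innermost k-loop with its break (under Pre_ all indexing is in range, so getD is exact)
def pvLoopK (a b : Nat → Nat → Bool) (i j : Nat) : List Nat → List (List Bool) → List (List Bool)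
  | [], C => C
  | k :: ks, C => if a i k && b k j then pvSetC C i j else pvLoopK a b i j ks C

def multiply_bool_matrices (A : List (List Bool)) (B : List (List Bool)) : List (List Bool) :=
  let m := A.length
  let C0 := List.replicate m (List.replicate m false)
  (List.range m).foldl (fun C i =>
    (List.range m).foldl (fun C j =>
      pvLoopK (fun i k => (A.getD i []).getD k false)
              (fun k j => (B.getD k []).getD j false) i j (List.range m) C) C) C0

-- ===== PORT B =====
-- hand port of format(acc, '0%db' % m): pvLittle = little-endian binary digit chars of acc,
-- pvDig = the big-endian digit string format produces (exact for a Nat and binary base)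
def pvLittle (n : Nat) : List Char :=
  if h : n = 0 then []
  else (if n % 2 = 1 then '1' else '0') :: pvLittle (n / 2)
decreasing_by exact Nat.div_lt_self (Nat.pos_of_ne_zero h) (by norm_num)

def pvDig (n : Nat) : List Char := if n = 0 then ['0'] else (pvLittle n).reverse

def multiply_bool_matrices_alt (A : List (List Bool)) (B : List (List Bool)) : List (List Bool) :=
  let m := A.length
  -- bm[k] = row k of B packed as a bitmask (bit j set iff B[k][j])
  let bm := (List.range m).map (fun k =>
    let row := B.getD k []
    (List.range m).foldl (fun mask j =>
      if row.getD j false then mask ||| (1 <<< j) else mask) 0)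
  (List.range m).map (fun i =>
    let rowA := A.getD i []
    let acc := (List.range m).foldl (fun acc k =>
      if rowA.getD k false then acc ||| bm.getD k 0 else acc) 0
    -- s = format(acc, '0%db' % m)[::-1]  (zero-pad on the left to width m, then reverse)
    let s := (List.replicate (m - (pvDig acc).length) '0' ++ pvDig acc).reverse
    (s.take m).map (fun c => c == '1'))

-- ===== PRECONDITION & SPEC =====
-- Pre_ requires B to supply a full m×m block (m = len(A)); excluded are the ragged inputs on
-- which Python A raises IndexError, plus ragged inputs on which A happens to return only
-- because short-circuiting skips the missing entries — there B's bitmask build raises.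
def Pre_multiply_bool_matrices (A : List (List Bool)) (B : List (List Bool)) : Prop :=
  A.length ≤ B.length ∧ (∀ r ∈ A, A.length ≤ r.length) ∧
    (∀ r ∈ B.take A.length, A.length ≤ r.length)
instance (A : List (List Bool)) (B : List (List Bool)) : Decidable (Pre_multiply_bool_matrices A B) := by unfold Pre_multiply_bool_matrices; infer_instance

def pvWitness_multiply_bool_matrices : List (List Bool) × List (List Bool) :=
  ([[true, false], [false, true]], [[true, true], [false, true]])

def Spec_multiply_bool_matrices (A : List (List Bool)) (B : List (List Bool)) (out : List (List Bool)) : Prop := out = multiply_bool_matrices_alt A B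
instance (A : List (List Bool)) (B : List (List Bool)) (out : List (List Bool)) : Decidable (Spec_multiply_bool_matrices A B out) := by unfold Spec_multiply_bool_matrices; infer_instance

-- ===== CLAIM (what is proved, stated in full; the proofs are below) =====
def Claim_equal_multiply_bool_matrices : Prop := ∀ (A : List (List Bool)) (B : List (List Bool)), Dom_multiply_bool_matrices A B → Pre_multiply_bool_matrices A B → Spec_multiply_bool_matrices A B (multiply_bool_matrices A B)

-- ===== LEMMAS AND PROOFS =====

-- the common target: pvHit a b m i j = ∃ k < m, a i k ∧ b k j
def pvHit (a b : Nat → Nat → Bool) (m i j : Nat) : Bool :=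
  (List.range m).any (fun k => a i k && b k j)

def pvS (a b : Nat → Nat → Bool) (m : Nat) : List (List Bool) :=
  (List.range m).map (fun i => (List.range m).map (fun j => pvHit a b m i j))

lemma pvGetD_set_self {α : Type} (l : List α) (i : Nat) (x d : α) (h : i < l.length) :
    (l.set i x).getD i d = x := by
  rw [List.getD_eq_getElem?_getD, List.getElem?_set_self h]; rfl

lemma pvGetD_set_ne {α : Type} (l : List α) (i t : Nat) (x d : α) (h : i ≠ t) :
    (l.set i x).getD t d = l.getD t d := by
  rw [List.getD_eq_getElem?_getD, List.getElem?_set_ne h, ← List.getD_eq_getElem?_getD]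

lemma pvSet_getD_self {α : Type} (l : List α) (i : Nat) (d : α) (h : i < l.length) :
    l.set i (l.getD i d) = l := by
  apply List.ext_getElem
  · simp
  · intro n h1 h2
    simp only [List.getElem_set]
    split
    · subst_vars
      simp [List.getD_eq_getElem?_getD, List.getElem?_eq_getElem h2]
    · rfl

lemma pvLoopK_char (a b : Nat → Nat → Bool) (i j : Nat) (ks : List Nat)
    (C : List (List Bool)) :
    pvLoopK a b i j ks C =
      if ks.any (fun k => a i k && b k j) then pvSetC C i j else C := by
  induction ks with
  | nil => simp [pvLoopK]
  | cons k ks ih =>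
    by_cases h : (a i k && b k j) = true
    · simp [pvLoopK, h]
    · simp [pvLoopK, h, ih]

lemma pvLoopK_char' (a b : Nat → Nat → Bool) (m i j : Nat) (C : List (List Bool)) :
    pvLoopK a b i j (List.range m) C = if pvHit a b m i j then pvSetC C i j else C :=
  pvLoopK_char a b i j (List.range m) C

-- the inner j-loop of A, characterised as one row update
lemma pvInner_char (a b : Nat → Nat → Bool) (m i : Nat) :
    ∀ (js : List Nat) (C : List (List Bool)), i < C.length →
      js.foldl (fun C j => pvLoopK a b i j (List.range m) C) C
      = C.set i (js.foldl (fun r j => if pvHit a b m i j then r.set j true else r)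
                   (C.getD i [])) := by
  intro js
  induction js with
  | nil =>
    intro C h
    simp only [List.foldl_nil]
    exact (pvSet_getD_self C i [] h).symm
  | cons j js ih =>
    intro C h
    rw [List.foldl_cons, List.foldl_cons, pvLoopK_char' a b m i j C]
    by_cases hh : pvHit a b m i j = true
    · have hset : i < (pvSetC C i j).length := by simpa [pvSetC] using h
      rw [if_pos hh, if_pos hh, ih _ hset]
      simp only [pvSetC]
      rw [List.set_set, pvGetD_set_self C i _ [] h]
    · rw [if_neg hh, if_neg hh, ih C h]

-- the row-update fold preserves length
lemma pvRowFold_length (p : Nat → Bool) :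
    ∀ (js : List Nat) (r : List Bool),
      (js.foldl (fun r j => if p j then r.set j true else r) r).length = r.length := by
  intro js
  induction js with
  | nil => intro r; rfl
  | cons j js ih =>
    intro r
    by_cases h : p j = true <;> simp [h, ih]

-- entries of the row-update fold
lemma pvRowFold_getD (p : Nat → Bool) :
    ∀ (js : List Nat) (r : List Bool) (t : Nat),
      (js.foldl (fun r j => if p j then r.set j true else r) r).getD t false
      = (r.getD t false || (decide (t < r.length) && p t && js.any (fun j => j == t))) := by
  intro js
  induction js with
  | nil => intro r t; simp
  | cons j js ih =>
    intro r t
    simp only [List.foldl_cons, List.any_cons]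
    by_cases h : p j = true
    · rw [if_pos h, ih]
      by_cases hjt : j = t
      · subst hjt
        by_cases hlt : j < r.length
        · simp [pvGetD_set_self r j true false hlt, hlt, h]
        · rw [List.set_eq_of_length_le (Nat.le_of_not_lt hlt)]
          simp [hlt]
      · have hb : (j == t) = false := by simpa using hjt
        rw [pvGetD_set_ne r j t true false hjt]
        simp [hb, List.length_set]
    · rw [if_neg h, ih]
      by_cases hjt : j = t
      · subst hjt
        have hbf : p j = false := by simpa using h
        simp [hbf]
      · have hb : (j == t) = false := by simpa using hjt
        simp [hb]

-- the outer i-loop of A: length and rows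
lemma pvOuter_char (a b : Nat → Nat → Bool) (m : Nat) :
    ∀ (is : List Nat) (C : List (List Bool)), is.Nodup → (∀ i ∈ is, i < C.length) →
      (is.foldl (fun C i =>
          (List.range m).foldl (fun C j => pvLoopK a b i j (List.range m) C) C) C).length
        = C.length ∧
      ∀ t, (is.foldl (fun C i =>
          (List.range m).foldl (fun C j => pvLoopK a b i j (List.range m) C) C) C).getD t []
        = if t ∈ is then
            (List.range m).foldl (fun r j => if pvHit a b m t j then r.set j true else r)
              (C.getD t [])
          else C.getD t [] := by
  intro is
  induction is with
  | nil => intro C _ _; exact ⟨rfl, fun t => by simp⟩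
  | cons i is ih =>
    intro C hnd hlt
    have hiC : i < C.length := hlt i (by simp)
    simp only [List.foldl_cons, pvInner_char a b m i (List.range m) C hiC]
    set r' := (List.range m).foldl (fun r j => if pvHit a b m i j then r.set j true else r)
        (C.getD i []) with hr'
    have hlen : (C.set i r').length = C.length := by simp
    have hnd' : is.Nodup := hnd.of_cons
    have hni : i ∉ is := by simp_all [List.nodup_cons]
    have hlt' : ∀ x ∈ is, x < (C.set i r').length := fun x hx => hlen ▸ hlt x (by simp [hx])
    obtain ⟨ihl, ihe⟩ := ih (C.set i r') hnd' hlt'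
    refine ⟨by rw [ihl, hlen], fun t => ?_⟩
    rw [ihe t]
    by_cases ht : t ∈ is
    · have hit : i ≠ t := fun h => hni (h ▸ ht)
      rw [if_pos ht, pvGetD_set_ne C i t r' [] hit,
        if_pos (show t ∈ i :: is from List.mem_cons_of_mem _ ht)]
    · by_cases hti : t = i
      · subst hti
        rw [if_neg ht, pvGetD_set_self C t r' [] hiC, hr',
          if_pos (show t ∈ t :: is from List.mem_cons_self ..)]
      · rw [if_neg ht, pvGetD_set_ne C i t r' [] (fun h => hti h.symm),
          if_neg (by simp [ht, hti])]

lemma pvRange_any_beq (m t : Nat) (ht : t < m) :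
    ((List.range m).any fun j => j == t) = true := by
  simp only [List.any_eq_true]
  exact ⟨t, List.mem_range.2 ht, by simp⟩

-- A's port computes pvS
lemma pvA_char (A B : List (List Bool)) :
    multiply_bool_matrices A B
      = pvS (fun i k => (A.getD i []).getD k false)
            (fun k j => (B.getD k []).getD j false) A.length := by
  set a := fun i k => (A.getD i []).getD k false
  set b := fun k j => (B.getD k []).getD j false
  set m := A.length
  obtain ⟨hl, he⟩ := pvOuter_char a b m (List.range m)
    (List.replicate m (List.replicate m false)) (List.nodup_range)
    (fun i hi => by simpa using List.mem_range.1 hi)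
  show (List.range m).foldl _ _ = _
  apply List.ext_getElem
  · rw [hl]; simp [pvS]
  · intro i h1 h2
    rw [← List.getD_eq_getElem _ [] h1, he i]
    have him : i < m := by simpa [pvS] using h2
    have hrow : (List.replicate m (List.replicate m false)).getD i [] = List.replicate m false := by
      simp [List.getD_eq_getElem?_getD, him]
    rw [if_pos (List.mem_range.2 him), hrow]
    apply List.ext_getElem
    · simp [pvRowFold_length, pvS]
    · intro t ht1 ht2
      rw [← List.getD_eq_getElem _ false ht1, pvRowFold_getD]
      have htm : t < m := by simpa [pvS] using ht2
      simp [pvS, htm, pvRange_any_beq m t htm]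

-- bit t of an OR-accumulating fold
lemma pvFoldOr_testBit (q : Nat → Bool) (f : Nat → Nat) :
    ∀ (l : List Nat) (acc t : Nat),
      ((l.foldl (fun x k => if q k then x ||| f k else x) acc).testBit t)
      = (acc.testBit t || l.any (fun k => q k && (f k).testBit t)) := by
  intro l
  induction l with
  | nil => intro acc t; simp
  | cons k l ih =>
    intro acc t
    by_cases h : q k = true
    · simp [h, ih, Nat.testBit_or, Bool.or_assoc]
    · simp [h, ih]

lemma pvShl_testBit (j t : Nat) : (1 <<< j).testBit t = (j == t) := by
  rw [Nat.one_shiftLeft, Nat.testBit_two_pow]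
  by_cases h : j = t <;> simp [h]

-- abbreviations for B's intermediate values (proof-side only)
def pvBM (bb : Nat → Nat → Bool) (m : Nat) : List Nat :=
  (List.range m).map (fun k =>
    (List.range m).foldl (fun mask j => if bb k j then mask ||| (1 <<< j) else mask) 0)

def pvAcc (aa bb : Nat → Nat → Bool) (m i : Nat) : Nat :=
  (List.range m).foldl (fun acc k => if aa i k then acc ||| (pvBM bb m).getD k 0 else acc) 0

lemma pvBM_bit (bb : Nat → Nat → Bool) (m k j : Nat) (hk : k < m) (hj : j < m) :
    ((pvBM bb m).getD k 0).testBit j = bb k j := by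
  have hbmk : (pvBM bb m).getD k 0
      = (List.range m).foldl (fun mask j => if bb k j then mask ||| (1 <<< j) else mask) 0 := by
    simp [pvBM, List.getD_eq_getElem?_getD, hk]
  rw [hbmk, pvFoldOr_testBit]
  simp only [pvShl_testBit, Nat.zero_testBit, Bool.false_or]
  rw [Bool.eq_iff_iff]
  simp only [List.any_eq_true, List.mem_range]
  constructor
  · rintro ⟨x, hx, hbx⟩
    obtain ⟨h1, h2⟩ := Bool.and_eq_true_iff.1 hbx
    rwa [eq_of_beq h2] at h1
  · intro hb; exact ⟨j, hj, by simp [hb]⟩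

lemma pvAcc_bit (aa bb : Nat → Nat → Bool) (m i j : Nat) (hj : j < m) :
    (pvAcc aa bb m i).testBit j = pvHit aa bb m i j := by
  rw [pvAcc, pvFoldOr_testBit]
  simp only [Nat.zero_testBit, Bool.false_or, pvHit]
  rw [Bool.eq_iff_iff]
  simp only [List.any_eq_true, List.mem_range]
  constructor
  · rintro ⟨k, hk, h⟩
    obtain ⟨h1, h2⟩ := Bool.and_eq_true_iff.1 h
    exact ⟨k, hk, Bool.and_eq_true_iff.2 ⟨h1, (pvBM_bit bb m k j hk hj) ▸ h2⟩⟩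
  · rintro ⟨k, hk, h⟩
    obtain ⟨h1, h2⟩ := Bool.and_eq_true_iff.1 h
    exact ⟨k, hk, Bool.and_eq_true_iff.2 ⟨h1, (pvBM_bit bb m k j hk hj).symm ▸ h2⟩⟩

-- digit j of the little-endian binary string is bit j
lemma pvLittle_getD (n : Nat) : ∀ j : Nat, ((pvLittle n).getD j '0' == '1') = n.testBit j := by
  induction n using Nat.strong_induction_on with
  | _ n ih =>
    intro j
    by_cases h : n = 0
    · subst h
      rw [pvLittle]
      simp [Nat.zero_testBit]
    · rw [pvLittle, dif_neg h]
      cases j with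
      | zero =>
        by_cases h2 : n % 2 = 1 <;> simp [h2, Nat.testBit_zero]
      | succ j =>
        rw [List.getD_cons_succ, Nat.testBit_add_one]
        exact ih (n / 2) (Nat.div_lt_self (Nat.pos_of_ne_zero h) (by norm_num)) j

lemma pvDig_bit (acc j : Nat) :
    ((pvDig acc).reverse.getD j '0' == '1') = acc.testBit j := by
  by_cases h : acc = 0
  · subst h
    rw [pvDig, if_pos rfl]
    cases j <;> simp [List.getD, Nat.zero_testBit]
  · rw [pvDig, if_neg h, List.reverse_reverse]
    exact pvLittle_getD acc j

-- entry j of the padded, reversed, truncated digit string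
lemma pvPad_getElem? (dig : List Char) (m j : Nat) (hj : j < m) :
    ((List.replicate (m - dig.length) '0' ++ dig).reverse.take m)[j]?
      = some (dig.reverse.getD j '0') := by
  rw [List.getElem?_take, if_pos hj, List.reverse_append, List.reverse_replicate]
  by_cases h : j < dig.reverse.length
  · rw [List.getElem?_append_left h, List.getD_eq_getElem?_getD,
      List.getElem?_eq_getElem h]
    simp
  · rw [List.getElem?_append_right (Nat.le_of_not_lt h), List.getElem?_replicate,
      List.getD_eq_getElem?_getD, List.getElem?_eq_none (Nat.le_of_not_lt h)]
    have hcond : j - dig.reverse.length < m - dig.length := by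
      simp only [List.length_reverse] at h ⊢
      omega
    rw [if_pos hcond]
    simp

-- one output row of B, characterised against an arbitrary bit predicate
lemma pvRow_char (acc m : Nat) (hit : Nat → Bool)
    (hbit : ∀ j, j < m → acc.testBit j = hit j) :
    (((List.replicate (m - (pvDig acc).length) '0' ++ pvDig acc).reverse.take m).map
        (fun c => c == '1'))
      = (List.range m).map hit := by
  apply List.ext_getElem?
  intro j
  rw [List.getElem?_map, List.getElem?_map]
  by_cases hj : j < m
  · rw [pvPad_getElem? (pvDig acc) m j hj, List.getElem?_range hj]
    simp only [Option.map_some]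
    rw [pvDig_bit, hbit j hj]
  · rw [List.getElem?_take, if_neg hj,
      List.getElem?_eq_none (l := List.range m) (by simpa using Nat.le_of_not_lt hj)]
    simp

lemma pvB_main (aa bb : Nat → Nat → Bool) (m : Nat) :
    ((List.range m).map (fun i =>
      (((List.replicate (m - (pvDig (pvAcc aa bb m i)).length) '0'
          ++ pvDig (pvAcc aa bb m i)).reverse.take m).map (fun c => c == '1'))))
    = pvS aa bb m := by
  unfold pvS
  apply List.map_congr_left
  intro i _
  exact pvRow_char (pvAcc aa bb m i) m _ (fun j hj => pvAcc_bit aa bb m i j hj)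

-- B's port computes pvS
lemma pvB_char (A B : List (List Bool)) :
    multiply_bool_matrices_alt A B
      = pvS (fun i k => (A.getD i []).getD k false)
            (fun k j => (B.getD k []).getD j false) A.length :=
  pvB_main (fun i k => (A.getD i []).getD k false)
    (fun k j => (B.getD k []).getD j false) A.length

-- ===== VERDICT (by name: the statement is the Claim_ definition above) =====
theorem multiply_bool_matrices_spec : Claim_equal_multiply_bool_matrices := by
  intro A B _ _
  unfold Spec_multiply_bool_matrices
  rw [pvA_char, pvB_char]
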